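-- pv_equiv track=rewrite | github.com/jeffdshen/kaggle-public | feedback/datasets.py | pred_to_words
-- ===== SOURCE A (Python) =====
-- def intersect_ranges(ranges, items):
--     # Given sorted ranges (non-overlapping) and sorted items (non-overlapping)
--     # Collect items that fall into these ranges and return the indices.
--     groups = []
--     index = 0
--     for r, s in ranges:
--         group = []
--         while index < len(items) and items[index][0] < s:
--             if r < items[index][1]:
--                 group.append(index)
--             index += 1
--         groups.append(group)
--     return groups
--
-- def pred_to_words(preds_batch, words_batch):
--     pred_words_batch = []
--     for preds, words in zip(preds_batch, words_batch):
--         if not preds: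
--             pred_words_batch.append([])
--             continue
--
--         pred_ranges, pred_labels = zip(*preds)
--         pred_words = intersect_ranges(pred_ranges, words)
--         pred_words = [(a, b) for a, b in list(zip(pred_words, pred_labels)) if a]
--         pred_words_batch.append(pred_words)
--
--     return pred_words_batch
-- ===== SOURCE B (Python) =====
-- def pred_to_words(preds_batch, words_batch):
--     out = []
--     for preds, words in zip(preds_batch, words_batch):
--         n = len(preds)
--         groups = [[] for _ in range(n)]
--         i = 0
--         for k, (ws, we) in enumerate(words):
--             while i < n and preds[i][0][1] <= ws:
--                 i += 1
--             if i == n: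
--                 break
--             if preds[i][0][0] < we:
--                 groups[i].append(k)
--         out.append([(g, lbl) for g, (_, lbl) in zip(groups, preds) if g])
--     return out
-- ===== Notes on version B (the rewrite author's own statement) =====
-- stated objective: alternative
-- what changed: A sweeps range-major (outer loop over predicted ranges, inner while consuming words via a shared pointer and appending per-range group lists); B sweeps item-major (one pass over the words, advancing a range pointer and writing each word's index into a preallocated per-range bucket), with no per-batch empty guard.
import Mathlib
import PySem

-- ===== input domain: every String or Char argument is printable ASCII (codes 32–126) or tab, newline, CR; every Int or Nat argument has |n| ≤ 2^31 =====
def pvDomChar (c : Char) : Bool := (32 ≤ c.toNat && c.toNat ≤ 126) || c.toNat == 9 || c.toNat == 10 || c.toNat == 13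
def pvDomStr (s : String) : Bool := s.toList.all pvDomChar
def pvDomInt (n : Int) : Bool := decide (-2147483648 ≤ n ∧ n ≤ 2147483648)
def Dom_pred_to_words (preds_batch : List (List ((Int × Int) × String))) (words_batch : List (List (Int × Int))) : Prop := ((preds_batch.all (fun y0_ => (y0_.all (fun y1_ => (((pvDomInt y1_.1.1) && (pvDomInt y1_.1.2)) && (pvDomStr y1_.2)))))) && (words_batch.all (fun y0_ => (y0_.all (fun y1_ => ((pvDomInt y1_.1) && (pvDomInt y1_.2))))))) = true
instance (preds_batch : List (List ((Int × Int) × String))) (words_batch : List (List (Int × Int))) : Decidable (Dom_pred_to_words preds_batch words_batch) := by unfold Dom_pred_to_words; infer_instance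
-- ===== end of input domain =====

-- B replaces A's range-major sweep (inner while over a shared item pointer) by an item-major single
-- pass over the words that advances a range pointer; objective: alternative (same asymptotic cost).

-- ===== PORT A =====
-- the inner `while index < len(items) and items[index][0] < s` loop of intersect_ranges;
-- `items` here is the not-yet-consumed suffix, `idx` the absolute pointer, `group` the accumulator
def irInner (r s : Int) : List (Int × Int) → Nat → List Int → List Int × Nat
  | [], idx, group => (group, idx)
  | (a, b) :: rest, idx, group =>
    if a < s then irInner r s rest (idx + 1) (if r < b then group ++ [(idx : Int)] else group)
    else (group, idx)

def intersect_ranges (ranges : List (Int × Int)) (items : List (Int × Int)) : List (List Int) :=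
  (ranges.foldl
    (fun (st : List (List Int) × Nat) rs =>
      let gi := irInner rs.1 rs.2 (items.drop st.2) st.2 []
      (st.1 ++ [gi.1], gi.2))
    ([], 0)).1

def pred_to_words (preds_batch : List (List ((Int × Int) × String))) (words_batch : List (List (Int × Int))) : List (List (List Int × String)) :=
  (List.zip preds_batch words_batch).foldl
    (fun acc pw =>
      if pw.1 = [] then acc ++ [[]]
      else
        let pred_ranges := pw.1.map Prod.fst
        let pred_labels := pw.1.map Prod.snd
        let pred_words := intersect_ranges pred_ranges pw.2
        acc ++ [(pred_words.zip pred_labels).filter (fun ab => ab.1 ≠ [])])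
    []

-- ===== PORT B =====
-- the `while i < n and preds[i][0][1] <= ws` pointer advance
def advanceB (preds : List ((Int × Int) × String)) (ws : Int) (i : Nat) : Nat :=
  if h : i < preds.length then
    if (preds[i]).1.2 ≤ ws then advanceB preds ws (i + 1) else i
  else i
termination_by preds.length - i

-- the `for k, (ws, we) in enumerate(words)` loop; `i = n` is the break
def sweepB (preds : List ((Int × Int) × String)) :
    List (Int × Int) → Nat → Nat → List (List Int) → List (List Int)
  | [], _, _, groups => groups
  | w :: rest, k, i, groups =>
    let i' := advanceB preds w.1 i
    if h : i' < preds.length then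
      sweepB preds rest (k + 1) i'
        (if (preds[i']).1.1 < w.2 then groups.set i' (groups.getD i' [] ++ [(k : Int)]) else groups)
    else groups

def pred_to_words_alt (preds_batch : List (List ((Int × Int) × String))) (words_batch : List (List (Int × Int))) : List (List (List Int × String)) :=
  (List.zip preds_batch words_batch).foldl
    (fun acc pw =>
      let groups := sweepB pw.1 pw.2 0 0 (List.replicate pw.1.length [])
      acc ++ [((groups.zip pw.1).filter (fun gp => gp.1 ≠ [])).map (fun gp => (gp.1, gp.2.2))])
    []

-- ===== PRECONDITION & SPEC =====
def Spec_pred_to_words (preds_batch : List (List ((Int × Int) × String))) (words_batch : List (List (Int × Int))) (out : List (List (List Int × String))) : Prop := out = pred_to_words_alt preds_batch words_batch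
instance (preds_batch : List (List ((Int × Int) × String))) (words_batch : List (List (Int × Int))) (out : List (List (List Int × String))) : Decidable (Spec_pred_to_words preds_batch words_batch out) := by unfold Spec_pred_to_words; infer_instance

-- ===== CLAIM (what is proved, stated in full; the proofs are below) =====
def Claim_equal_pred_to_words : Prop := ∀ (preds_batch : List (List ((Int × Int) × String))) (words_batch : List (List (Int × Int))), Dom_pred_to_words preds_batch words_batch → Spec_pred_to_words preds_batch words_batch (pred_to_words preds_batch words_batch)

-- ===== LEMMAS AND PROOFS =====

-- canonical recursion both ports are reduced to:
-- consumeC r s items idx = (group, remaining items, new pointer) of one inner-while run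
def consumeC (r s : Int) : List (Int × Int) → Nat → List Int × List (Int × Int) × Nat
  | [], idx => ([], [], idx)
  | (a, b) :: t, idx =>
    if a < s then
      let c := consumeC r s t (idx + 1)
      ((if r < b then (idx : Int) :: c.1 else c.1), c.2)
    else ([], (a, b) :: t, idx)

def runC : List (Int × Int) → List (Int × Int) → Nat → List (List Int)
  | [], _, _ => []
  | rs0 :: rs, items, idx =>
    let c := consumeC rs0.1 rs0.2 items idx
    c.1 :: runC rs c.2.1 c.2.2

lemma irInner_eq (r s : Int) : ∀ (items : List (Int × Int)) (idx : Nat) (g0 : List Int),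
    irInner r s items idx g0 =
      (g0 ++ (consumeC r s items idx).1, (consumeC r s items idx).2.2) := by
  intro items
  induction items with
  | nil => intro idx g0; simp [irInner, consumeC]
  | cons p t ih =>
    intro idx g0
    obtain ⟨a, b⟩ := p
    by_cases h : a < s
    · simp only [irInner, consumeC, if_pos h]
      rw [ih]
      by_cases hb : r < b <;> simp [hb]
    · simp [irInner, consumeC, h]

lemma consumeC_suffix (r s : Int) : ∀ (items : List (Int × Int)) (idx : Nat),
    idx ≤ (consumeC r s items idx).2.2 ∧
    (consumeC r s items idx).2.1 = items.drop ((consumeC r s items idx).2.2 - idx) := by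
  intro items
  induction items with
  | nil => intro idx; simp [consumeC]
  | cons p t ih =>
    intro idx
    obtain ⟨a, b⟩ := p
    by_cases h : a < s
    · simp only [consumeC, if_pos h]
      obtain ⟨h1, h2⟩ := ih (idx + 1)
      constructor
      · omega
      · rw [h2]
        have : (consumeC r s t (idx + 1)).2.2 - idx = ((consumeC r s t (idx + 1)).2.2 - (idx + 1)) + 1 := by omega
        rw [this]
        simp [List.drop_succ_cons]
    · simp [consumeC, h]



lemma foldA (items : List (Int × Int)) : ∀ (ranges : List (Int × Int)) (acc : List (List Int)) (idx : Nat),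
    (ranges.foldl
      (fun (st : List (List Int) × Nat) rs =>
        let gi := irInner rs.1 rs.2 (items.drop st.2) st.2 []
        (st.1 ++ [gi.1], gi.2)) (acc, idx)).1 = acc ++ runC ranges (items.drop idx) idx := by
  intro ranges
  induction ranges with
  | nil => intro acc idx; simp [runC]
  | cons rs rsT ih =>
    intro acc idx
    rw [List.foldl_cons]
    conv_lhs => rw [irInner_eq]
    rw [ih]
    obtain ⟨hle, hsuf⟩ := consumeC_suffix rs.1 rs.2 (items.drop idx) idx
    simp only [runC]
    rw [hsuf, List.drop_drop]
    have h2 : idx + ((consumeC rs.1 rs.2 (items.drop idx) idx).2.2 - idx)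
        = (consumeC rs.1 rs.2 (items.drop idx) idx).2.2 := by omega
    rw [h2]
    simp

lemma intersect_eq_runC (ranges items : List (Int × Int)) :
    intersect_ranges ranges items = runC ranges items 0 := by
  unfold intersect_ranges
  rw [foldA]
  simp

lemma advanceB_le (preds : List ((Int × Int) × String)) (ws : Int) :
    ∀ i, i ≤ preds.length → advanceB preds ws i ≤ preds.length := by
  intro i
  fun_induction advanceB preds ws i with
  | case1 i h hle ih => intro _; exact ih (by omega)
  | case2 i h hgt => intro _; omega
  | case3 i h => intro hi; exact hi

lemma advanceB_ge (preds : List ((Int × Int) × String)) (ws : Int) :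
    ∀ i, i ≤ advanceB preds ws i := by
  intro i
  fun_induction advanceB preds ws i with
  | case1 i h hle ih => omega
  | case2 i h hgt => omega
  | case3 i h => omega

lemma advanceB_skip (preds : List ((Int × Int) × String)) (ws : Int) :
    ∀ i j (h : j < preds.length), i ≤ j → j < advanceB preds ws i → (preds[j]).1.2 ≤ ws := by
  intro i
  fun_induction advanceB preds ws i with
  | case1 i h hle ih =>
    intro j hj hij hlt
    rcases Nat.eq_or_lt_of_le hij with rfl | hij'
    · exact hle
    · exact ih j hj (by omega) hlt
  | case2 i h hgt => intro j hj hij hlt; omega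
  | case3 i h => intro j hj hij hlt; omega

lemma advanceB_stop (preds : List ((Int × Int) × String)) (ws : Int) :
    ∀ i (h : advanceB preds ws i < preds.length), ws < (preds[advanceB preds ws i]'h).1.2 := by
  intro i
  fun_induction advanceB preds ws i with
  | case1 i h hle ih => exact ih
  | case2 i h hgt => intro _; omega
  | case3 i h => intro h'; omega

lemma runC_nil_items : ∀ (rs : List (Int × Int)) (idx : Nat),
    runC rs [] idx = List.replicate rs.length [] := by
  intro rs
  induction rs with
  | nil => intro idx; simp [runC]
  | cons r t ih => intro idx; simp [runC, consumeC, ih, List.replicate_succ]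

lemma runC_skip_prefix : ∀ (rs1 rs2 : List (Int × Int)) (ws we : Int) (rest : List (Int × Int)) (idx : Nat),
    (∀ p ∈ rs1, p.2 ≤ ws) →
    runC (rs1 ++ rs2) ((ws, we) :: rest) idx =
      List.replicate rs1.length [] ++ runC rs2 ((ws, we) :: rest) idx := by
  intro rs1
  induction rs1 with
  | nil => intro rs2 ws we rest idx _; simp
  | cons r t ih =>
    intro rs2 ws we rest idx hall
    have hr : r.2 ≤ ws := hall r (by simp)
    have hlt : ¬ (ws < r.2) := by omega
    simp only [List.cons_append, runC, consumeC, if_neg hlt, List.length_cons,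
      List.replicate_succ, List.cons_append]
    rw [ih rs2 ws we rest idx (fun p hp => hall p (by simp [hp]))]

lemma getD_mid {α : Type} : ∀ (l : List α) (x : α) (t : List α) (d : α),
    (l ++ x :: t).getD l.length d = x := by
  intro l
  induction l with
  | nil => intro x t d; simp [List.getD]
  | cons a l ih => intro x t d; simp [List.getD]

lemma set_mid {α : Type} : ∀ (l : List α) (x : α) (t : List α) (y : α),
    (l ++ x :: t).set l.length y = l ++ y :: t := by
  intro l
  induction l with
  | nil => intro x t y; simp
  | cons a l ih => intro x t y; simp [ih]

-- main loop-interchange invariant: B's item-major sweep computes the canonical recursion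
lemma sweepB_eq (preds : List ((Int × Int) × String)) :
    ∀ (items : List (Int × Int)) (idx : Nat) (gdone : List (List Int)) (gcur : List Int) (m : Nat),
    gdone.length + (m + 1) = preds.length →
    sweepB preds items idx gdone.length (gdone ++ gcur :: List.replicate m []) =
      gdone ++ (runC ((preds.map Prod.fst).drop gdone.length) items idx).modifyHead (gcur ++ ·) := by
  intro items
  induction items with
  | nil =>
    intro idx gdone gcur m hlen
    have hd : ((preds.map Prod.fst).drop gdone.length).length = m + 1 := by
      simp [List.length_drop]; omega
    simp only [sweepB, runC_nil_items, hd, List.replicate_succ, List.modifyHead_cons,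
      List.append_nil]
  | cons w rest ih =>
    obtain ⟨ws, we⟩ := w
    intro idx gdone gcur m hlen
    have hi : gdone.length ≤ preds.length := by omega
    have hge : gdone.length ≤ advanceB preds ws gdone.length := advanceB_ge preds ws gdone.length
    have hle' : advanceB preds ws gdone.length ≤ preds.length := advanceB_le preds ws gdone.length hi
    have hskipall : ∀ p ∈ ((preds.map Prod.fst).drop gdone.length).take
        (advanceB preds ws gdone.length - gdone.length), p.2 ≤ ws := by
      intro p hp
      rw [List.mem_iff_getElem] at hp
      obtain ⟨j, hj, hpe⟩ := hp
      have hjlen : j < advanceB preds ws gdone.length - gdone.length := by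
        simp [List.length_take] at hj
        omega
      have hjp : gdone.length + j < preds.length := by omega
      have hpj : p = (preds[gdone.length + j]'hjp).1 := by
        rw [← hpe, List.getElem_take, List.getElem_drop, List.getElem_map]
      rw [hpj]
      exact advanceB_skip preds ws gdone.length (gdone.length + j) hjp (by omega) (by omega)
    by_cases hn : advanceB preds ws gdone.length < preds.length
    · -- the item w is consumed at range i'
      have hws : ws < (preds[advanceB preds ws gdone.length]'hn).1.2 :=
        advanceB_stop preds ws gdone.length hn
      rcases Nat.eq_or_lt_of_le hge with heq | hlt
      · -- i' = i : w belongs to the current group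
        have hn' : gdone.length < preds.length := by omega
        have hgE : (preds[advanceB preds ws gdone.length]'hn) = preds[gdone.length]'hn' := by
          have h' := heq.symm
          simp only [h']
        have hws' : ws < (preds[gdone.length]'hn').1.2 := hgE ▸ hws
        have hdropi : (preds.map Prod.fst).drop gdone.length =
            (preds[gdone.length]'hn').1 :: (preds.map Prod.fst).drop (gdone.length + 1) := by
          rw [List.drop_eq_getElem_cons (by simp; omega), List.getElem_map]
        simp only [sweepB, ← heq, getD_mid, set_mid]
        rw [dif_pos hn']
        by_cases hb : (preds[gdone.length]'hn').1.1 < we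
        · rw [if_pos hb]
          rw [ih (idx + 1) gdone (gcur ++ [(idx : Int)]) m hlen]
          rw [hdropi]
          simp only [runC, consumeC, if_pos hws', if_pos hb, List.modifyHead_cons]
          simp
        · rw [if_neg hb]
          rw [ih (idx + 1) gdone gcur m hlen]
          rw [hdropi]
          simp only [runC, consumeC, if_pos hws', if_neg hb, List.modifyHead_cons]
      · -- i < i' : ranges i .. i'-1 are passed over; w belongs to a later group
        have hdm : advanceB preds ws gdone.length - gdone.length ≤ m := by omega
        set d := advanceB preds ws gdone.length - gdone.length with hd
        have hd1 : 1 ≤ d := by omega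
        set gd' := gdone ++ gcur :: List.replicate (d - 1) ([] : List Int) with hgd'
        have hL : gd'.length = advanceB preds ws gdone.length := by
          simp [hgd', List.length_append, List.length_replicate]; omega
        have hm : List.replicate m ([] : List Int) =
            List.replicate (d - 1) [] ++ [] :: List.replicate (m - d) [] := by
          conv_lhs => rw [show m = (d - 1) + ((m - d) + 1) by omega]
          rw [List.replicate_add, List.replicate_succ]
        have hre : gdone ++ gcur :: List.replicate m ([] : List Int) =
            gd' ++ ([] : List Int) :: List.replicate (m - d) [] := by
          rw [hm, hgd']
          simp
        have hsplit : ((preds.map Prod.fst).drop gdone.length) =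
            (((preds.map Prod.fst).drop gdone.length).take d) ++
              ((preds.map Prod.fst).drop (advanceB preds ws gdone.length)) := by
          conv_lhs => rw [← List.take_append_drop d ((preds.map Prod.fst).drop gdone.length)]
          rw [List.drop_drop, show gdone.length + d = advanceB preds ws gdone.length by omega]
        have hlen_take : ((((preds.map Prod.fst)).drop gdone.length).take d).length = d := by
          simp [List.length_take, List.length_drop]; omega
        have hdropi' : (preds.map Prod.fst).drop (advanceB preds ws gdone.length) =
            (preds[advanceB preds ws gdone.length]'hn).1 ::
              (preds.map Prod.fst).drop (advanceB preds ws gdone.length + 1) := by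
          rw [List.drop_eq_getElem_cons (by simp; omega), List.getElem_map]
        -- right-hand side: d skipped groups, then the group of range i'
        conv_rhs => rw [hsplit, runC_skip_prefix _ _ ws we rest idx hskipall, hlen_take, hdropi']
        simp only [sweepB]
        rw [dif_pos hn, hre]
        set P := preds[advanceB preds ws gdone.length]'hn with hP
        rw [← hL] at hdropi' ⊢
        rw [getD_mid, set_mid]
        simp only [List.nil_append]
        by_cases hb : P.1.1 < we
        · rw [if_pos hb, ih (idx + 1) gd' [(idx : Int)] (m - d) (by rw [hL]; omega)]
          rw [hdropi']
          simp only [runC, consumeC, if_pos hws, if_pos hb, List.modifyHead_cons]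
          rw [show d = (d - 1) + 1 by omega, List.replicate_succ]
          simp [hgd']
        · rw [if_neg hb, ih (idx + 1) gd' [] (m - d) (by rw [hL]; omega)]
          rw [hdropi']
          simp only [runC, consumeC, if_pos hws, if_neg hb, List.modifyHead_cons]
          rw [show d = (d - 1) + 1 by omega, List.replicate_succ]
          simp [hgd']
    · -- i' = n : break, the remaining items are dropped
      have hsplit : (preds.map Prod.fst).drop gdone.length =
          ((preds.map Prod.fst).drop gdone.length).take
            (advanceB preds ws gdone.length - gdone.length) := by
        rw [List.take_of_length_le]
        simp [List.length_drop]; omega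
      have hlen1 : (((preds.map Prod.fst).drop gdone.length).take
          (advanceB preds ws gdone.length - gdone.length)).length = m + 1 := by
        simp [List.length_take, List.length_drop]; omega
      simp only [sweepB, dif_neg hn]
      conv_rhs => rw [hsplit]
      have happ : (((preds.map Prod.fst).drop gdone.length).take
            (advanceB preds ws gdone.length - gdone.length) : List (Int × Int)) =
          (((preds.map Prod.fst).drop gdone.length).take
            (advanceB preds ws gdone.length - gdone.length)) ++ [] := by simp
      conv_rhs => rw [happ]
      rw [runC_skip_prefix _ [] ws we rest idx hskipall]
      simp only [runC, List.append_nil, hlen1, List.replicate_succ, List.modifyHead_cons,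
        List.append_nil]

lemma zip_filter_map (gs : List (List Int)) :
    ∀ (preds : List ((Int × Int) × String)),
    ((gs.zip preds).filter (fun gp => gp.1 ≠ [])).map (fun gp => (gp.1, gp.2.2)) =
      (gs.zip (preds.map Prod.snd)).filter (fun ab => ab.1 ≠ []) := by
  induction gs with
  | nil => intro preds; simp
  | cons g gt ih =>
    intro preds
    cases preds with
    | nil => simp
    | cons p pt =>
      by_cases hg : g = []
      · simp [hg]
        simpa using ih pt
      · simp [hg]
        simpa using ih pt

lemma foldl_app {α β : Type} (g : α → β) : ∀ (l : List α) (acc : List β),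
    l.foldl (fun a x => a ++ [g x]) acc = acc ++ l.map g := by
  intro l
  induction l with
  | nil => intro acc; simp
  | cons x t ih => intro acc; simp [ih]

lemma per_batch (preds : List ((Int × Int) × String)) (words : List (Int × Int)) :
    (if preds = [] then ([] : List (List Int × String))
     else (( (intersect_ranges (preds.map Prod.fst) words).zip (preds.map Prod.snd)).filter (fun ab => ab.1 ≠ []))) =
    (((sweepB preds words 0 0 (List.replicate preds.length [])).zip preds).filter
        (fun gp => gp.1 ≠ [])).map (fun gp => (gp.1, gp.2.2)) := by
  cases preds with
  | nil =>
    cases words <;> simp [sweepB, advanceB]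
  | cons p pt =>
    rw [if_neg (by simp)]
    have hsw := sweepB_eq (p :: pt) words 0 [] [] pt.length (by simp)
    simp only [List.length_nil, List.nil_append, List.drop_zero] at hsw
    have hid : List.modifyHead (fun x => x) (runC (List.map Prod.fst (p :: pt)) words 0) =
        runC (List.map Prod.fst (p :: pt)) words 0 := by
      cases runC (List.map Prod.fst (p :: pt)) words 0 <;> simp
    rw [hid] at hsw
    have hrep : List.replicate (p :: pt).length ([] : List Int) =
        ([] : List Int) :: List.replicate pt.length [] := by
      simp [List.replicate_succ]
    rw [hrep, hsw, intersect_eq_runC, zip_filter_map]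

lemma foldA_if :
    ∀ (z : List (List ((Int × Int) × String) × List (Int × Int))) (acc : List (List (List Int × String))),
    z.foldl (fun acc pw =>
        if pw.1 = [] then acc ++ [[]]
        else acc ++ [((intersect_ranges (pw.1.map Prod.fst) pw.2).zip (pw.1.map Prod.snd)).filter
          (fun ab => ab.1 ≠ [])]) acc
      = acc ++ z.map (fun pw =>
          (((sweepB pw.1 pw.2 0 0 (List.replicate pw.1.length [])).zip pw.1).filter
            (fun gp => gp.1 ≠ [])).map (fun gp => (gp.1, gp.2.2))) := by
  intro z
  induction z with
  | nil => intro acc; simp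
  | cons pw zt ih =>
    intro acc
    rw [List.foldl_cons]
    have hpb := per_batch pw.1 pw.2
    by_cases h : pw.1 = []
    · rw [if_pos h, ih]
      rw [if_pos h] at hpb
      simp only [List.map_cons]
      rw [← hpb]
      simp
    · rw [if_neg h, ih]
      rw [if_neg h] at hpb
      simp only [List.map_cons]
      rw [← hpb]
      simp

-- ===== VERDICT (by name: the statement is the Claim_ definition above) =====
theorem pred_to_words_spec : Claim_equal_pred_to_words := by
  intro preds_batch words_batch _
  unfold Spec_pred_to_words
  simp only [pred_to_words, pred_to_words_alt]
  rw [foldA_if, foldl_app]
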